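-- pv_equiv track=rewrite | github.com/mshtelma/databricks-deep-research-agent | src/deep_research/agent/nodes/react_synthesizer.py | _is_markdown_structural
-- ===== SOURCE A (Python) =====
-- def _is_markdown_structural(text: str) -> bool:
--     """Check if text is a markdown structural element requiring its own line.
--
--     Structural elements include:
--     - Headers (# through ######)
--     - Bullet lists (-, *, +)
--     - Numbered lists (1., 2., etc.)
--     - Horizontal rules (---, ***, ___)
--
--     Args:
--         text: Text to check.
--
--     Returns:
--         True if text is a markdown structural element.
--     """
--     stripped = text.strip()
--     if not stripped:
--         return False
--
--     # Markdown headers (# through ######)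
--     if stripped.startswith("#"):
--         return True
--
--     # Bullet lists (-, *, +) - must have space after marker
--     if (
--         stripped.startswith(("-", "*", "+"))
--         and len(stripped) > 1
--         and stripped[1] in (" ", "\t")
--     ):
--         return True
--
--     # Numbered lists (1., 2., etc.)
--     if len(stripped) > 2 and stripped[0].isdigit() and stripped[1] == ".":
--         return True
--
--     # Horizontal rules (---, ***, ___)
--     if stripped in ("---", "***", "___"):
--         return True
--
--     # Extended horizontal rule patterns (3+ of same char)
--     if (
--         len(stripped) >= 3
--         and all(c == stripped[0] for c in stripped)
--         and stripped[0] in "-*_"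
--     ):
--         return True
--
--     return False
-- ===== SOURCE B (Python) =====
-- def _is_markdown_structural(text: str) -> bool:
--     """Single-pass DFA over the stripped text: one state machine consuming the
--     characters left to right, instead of a chain of whole-string tests."""
--     s = text.strip()
--     START, DASHSTAR, PLUS, RULE, DIGIT, DOT = range(6)
--     state, first, count = START, "", 0
--     for ch in s:
--         if state == START:
--             first = ch
--             if ch == "#":
--                 return True
--             elif ch in "-*":
--                 state, count = DASHSTAR, 1
--             elif ch == "+":
--                 state = PLUS
--             elif ch == "_":
--                 state, count = RULE, 1
--             elif ch.isdigit():
--                 state = DIGIT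
--             else:
--                 return False
--         elif state == DASHSTAR:
--             if ch in (" ", "\t"):
--                 return True
--             elif ch == first:
--                 state, count = RULE, 2
--             else:
--                 return False
--         elif state == PLUS:
--             return ch in (" ", "\t")
--         elif state == RULE:
--             if ch == first:
--                 count += 1
--             else:
--                 return False
--         elif state == DIGIT:
--             if ch == ".":
--                 state = DOT
--             else:
--                 return False
--         else:  # DOT: a numbered list needs at least one char after the dot
--             return True
--     return state == RULE and count >= 3
-- ===== Notes on version B (the rewrite author's own statement) =====
-- stated objective: alternative
-- what changed: A's chain of whole-string tests (startswith, guarded indexing, an all() scan, literal tuple comparisons) is replaced by a single left-to-right state machine with six explicit states that consumes the stripped text one character at a time and decides from the state reached at end of input.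
import Mathlib
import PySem

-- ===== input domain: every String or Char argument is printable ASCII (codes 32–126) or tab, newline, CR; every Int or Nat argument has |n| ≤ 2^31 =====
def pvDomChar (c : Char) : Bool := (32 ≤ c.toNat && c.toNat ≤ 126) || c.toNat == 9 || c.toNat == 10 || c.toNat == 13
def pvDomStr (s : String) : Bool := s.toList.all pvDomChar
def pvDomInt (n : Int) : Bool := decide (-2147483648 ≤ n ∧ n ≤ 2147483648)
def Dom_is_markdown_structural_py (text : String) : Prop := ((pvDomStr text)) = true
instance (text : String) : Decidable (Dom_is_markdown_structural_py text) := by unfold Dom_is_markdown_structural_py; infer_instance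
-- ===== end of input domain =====

-- B replaces A's chain of whole-string tests by a single left-to-right state machine over the stripped text (objective: alternative); equivalence proved on all inputs.


-- ===== PORT A =====
-- A's branch chain over the stripped text (`stripped` as a char list; `match` realises the `if not stripped` guard / the guarded `stripped[0]` accesses)
def pvACore : List Char → Bool
  | [] => false
  | c0 :: rest =>
    if PySem.Chars.startswith (c0 :: rest) ['#'] then true
    else if (PySem.Chars.startswith (c0 :: rest) ['-'] || PySem.Chars.startswith (c0 :: rest) ['*']
              || PySem.Chars.startswith (c0 :: rest) ['+'])
            && decide (1 < (c0 :: rest).length)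
            && (PySem.List.pyGet? (c0 :: rest) 1 == some ' ' || PySem.List.pyGet? (c0 :: rest) 1 == some '\t') then true
    else if decide (2 < (c0 :: rest).length) && PySem.Chars.isdigit c0
            && (PySem.List.pyGet? (c0 :: rest) 1 == some '.') then true
    else if (c0 :: rest) == "---".toList || (c0 :: rest) == "***".toList || (c0 :: rest) == "___".toList then true
    else if decide (3 ≤ (c0 :: rest).length) && (c0 :: rest).all (fun c => c == c0)
            && PySem.Chars.isIn [c0] "-*_".toList then true
    else false

def is_markdown_structural_py (text : String) : Bool :=
  pvACore (PySem.Str.strip text).toList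

-- ===== PORT B =====
-- B's state machine: PvBState is the loop's `state` variable; pvBRun is the loop (first = the char stored at START, count = the run length in RULE)
inductive PvBState | start | dashstar | plus | rule | digit | dot
deriving DecidableEq, Repr

def pvBRun (st : PvBState) (first : Char) (count : Nat) : List Char → Bool
  | [] => st == PvBState.rule && decide (3 ≤ count)
  | ch :: rest =>
    match st with
    | .start =>
      if ch == '#' then true
      else if ch == '-' || ch == '*' then pvBRun .dashstar ch 1 rest
      else if ch == '+' then pvBRun .plus ch count rest
      else if ch == '_' then pvBRun .rule ch 1 rest
      else if PySem.Chars.isdigit ch then pvBRun .digit ch count rest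
      else false
    | .dashstar =>
      if ch == ' ' || ch == '\t' then true
      else if ch == first then pvBRun .rule first 2 rest
      else false
    | .plus => ch == ' ' || ch == '\t'
    | .rule => if ch == first then pvBRun .rule first (count + 1) rest else false
    | .digit => if ch == '.' then pvBRun .dot first count rest else false
    | .dot => true

def is_markdown_structural_py_alt (text : String) : Bool :=
  pvBRun .start ' ' 0 (PySem.Str.strip text).toList

-- ===== PRECONDITION & SPEC =====
def Spec_is_markdown_structural_py (text : String) (out : Bool) : Prop := out = is_markdown_structural_py_alt text
instance (text : String) (out : Bool) : Decidable (Spec_is_markdown_structural_py text out) := by unfold Spec_is_markdown_structural_py; infer_instance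

-- ===== CLAIM (what is proved, stated in full; the proofs are below) =====
def Claim_equal_is_markdown_structural_py : Prop := ∀ (text : String), Dom_is_markdown_structural_py text → Spec_is_markdown_structural_py text (is_markdown_structural_py text)

-- ===== LEMMAS AND PROOFS =====

theorem pvSW (c x : Char) (rest : List Char) :
    PySem.Chars.startswith (c :: rest) [x] = (c == x) := by
  rw [Bool.eq_iff_iff, PySem.Chars.startswith_iff, beq_iff_eq, List.cons_prefix_cons]
  simp [eq_comm]

theorem pvIn3 (c : Char) :
    PySem.Chars.isIn [c] "-*_".toList = (c == '-' || c == '*' || c == '_') := by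
  rw [Bool.eq_iff_iff, PySem.Chars.isIn_iff_infix, List.singleton_infix_iff]
  simp [show "-*_".toList = ['-', '*', '_'] from by decide, or_assoc]

theorem pvGet1 (c d : Char) (rest : List Char) :
    PySem.List.pyGet? (c :: d :: rest) 1 = some d := by
  have := PySem.List.pyGet?_natCast (c :: d :: rest) 1
  simpa using this

-- Common explicit characterisation both ports are reduced to
def pvF : List Char → Bool
  | [] => false
  | [c] => c == '#'
  | c :: d :: rest =>
    (c == '#')
    || ((c == '-' || c == '*' || c == '+') && (d == ' ' || d == '\t'))
    || (PySem.Chars.isdigit c && d == '.' && decide (1 ≤ rest.length))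
    || ((c == '-' || c == '*' || c == '_') && d == c && rest.all (fun x => x == c) && decide (1 ≤ rest.length))


theorem pvA_eq_F (l : List Char) : pvACore l = pvF l := by
  cases l with
  | nil => rfl
  | cons c l =>
    cases l with
    | nil =>
      simp only [pvACore, pvF, pvSW, pvIn3]
      simp [show "---".toList = ['-', '-', '-'] from by decide,
        show "***".toList = ['*', '*', '*'] from by decide,
        show "___".toList = ['_', '_', '_'] from by decide]
      rw [Bool.eq_iff_iff]; simp
    | cons d rest =>
      rw [Bool.eq_iff_iff]
      simp only [pvACore, pvF, pvSW, pvIn3, pvGet1, List.length_cons, List.all_cons,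
        show "---".toList = ['-', '-', '-'] from by decide,
        show "***".toList = ['*', '*', '*'] from by decide,
        show "___".toList = ['_', '_', '_'] from by decide]
      split_ifs with h1 h2 h3 h4 h5 <;>
        simp only [Bool.and_eq_true, Bool.or_eq_true, beq_iff_eq, decide_eq_true_eq,
          Option.some.injEq, beq_self_eq_true, true_and, List.cons.injEq,
          List.all_eq_true] at * <;>
        try (apply iff_of_true trivial)
      · tauto
      · tauto
      · exact Or.inl (Or.inr ⟨⟨h3.1.2, h3.2⟩, by omega⟩)
      · rcases h4 with (⟨rfl, rfl, rfl⟩ | ⟨rfl, rfl, rfl⟩) | ⟨rfl, rfl, rfl⟩ <;> simp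
      · exact Or.inr ⟨⟨⟨h5.2, h5.1.2.1⟩, h5.1.2.2⟩, by omega⟩
      · rw [false_iff]
        rintro (((h | ⟨hc, hd⟩) | ⟨⟨hdig, hdot⟩, hlen⟩) | ⟨⟨⟨hc, hd⟩, hall⟩, hlen⟩)
        · exact h1 h
        · exact h2 ⟨⟨hc, by omega⟩, hd⟩
        · exact h3 ⟨⟨by omega, hdig⟩, hdot⟩
        · exact h5 ⟨⟨by omega, hd, hall⟩, hc⟩

theorem pvRule_run (l : List Char) (c : Char) (n : Nat) :
    pvBRun .rule c n l = (l.all (fun x => x == c) && decide (3 ≤ n + l.length)) := by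
  induction l generalizing n with
  | nil => simp [pvBRun]
  | cons x xs ih =>
    by_cases h : x = c
    · subst h
      simp only [pvBRun, beq_self_eq_true, if_true, ih, List.all_cons, beq_self_eq_true,
        Bool.true_and, List.length_cons]
      congr 1
      simp only [decide_eq_decide]
      omega
    · simp [pvBRun, h]

theorem pvDigit_ne (c : Char) (h : PySem.Chars.isdigit c = true) :
    c ≠ '#' ∧ c ≠ '-' ∧ c ≠ '*' ∧ c ≠ '+' ∧ c ≠ '_' := by
  simp [PySem.Chars.isdigit] at h
  refine ⟨?_, ?_, ?_, ?_, ?_⟩ <;> (rintro rfl; revert h; decide)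


theorem pvB_eq_F (l : List Char) : pvBRun .start ' ' 0 l = pvF l := by
  cases l with
  | nil => rfl
  | cons c l =>
    cases l with
    | nil =>
      by_cases h : c = '#'
      · subst h; rfl
      · by_cases hdig : PySem.Chars.isdigit c = true
        · obtain ⟨n1, n2, n3, n4, n5⟩ := pvDigit_ne c hdig
          simp [pvBRun, pvF, h, n2, n3, n4, n5, hdig]
        · simp only [pvBRun, pvF]
          split_ifs <;> simp_all [pvBRun]
    | cons d rest =>
      by_cases h1 : c = '#'
      · simp [pvBRun, pvF, h1]
      by_cases h2 : c = '-' ∨ c = '*'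
      · have f1 : (c == '#') = false := by simp [h1]
        have f2 : (c == '-' || c == '*') = true := by
          rcases h2 with rfl | rfl <;> simp
        have f3 : (c == '-' || c == '*' || c == '+') = true := by
          rcases h2 with rfl | rfl <;> simp
        have f4 : (c == '-' || c == '*' || c == '_') = true := by
          rcases h2 with rfl | rfl <;> simp
        have hnd : PySem.Chars.isdigit c = false := by
          rcases h2 with rfl | rfl <;> decide
        simp only [pvBRun, pvF, f1, f2, f3, f4, hnd, pvRule_run, if_false, if_true,
          Bool.false_and, Bool.true_and, Bool.false_or, Bool.or_false, cond_false]
        by_cases hsp : d = ' ' ∨ d = '\t'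
        · rcases hsp with rfl | rfl <;> simp
        · have hd1 : (d == ' ') = false := by simp; rintro rfl; exact hsp (Or.inl rfl)
          have hd2 : (d == '\t') = false := by simp; rintro rfl; exact hsp (Or.inr rfl)
          simp only [hd1, hd2, Bool.or_self, Bool.false_or, if_false]
          by_cases hdc : d = c
          · subst hdc
            cases hall : rest.all (fun x => x == d)
            · simp [hall]
            · simp [hall, decide_eq_decide]
              omega
          · simp [hdc]
      by_cases h3 : c = '+'
      · subst h3
        simp [pvBRun, pvF, show PySem.Chars.isdigit '+' = false from by decide]
      by_cases h4 : c = '_'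
      · subst h4
        simp only [pvBRun, pvF, pvRule_run, show PySem.Chars.isdigit '_' = false from by decide,
          show ('_' == '#') = false from by decide, show ('_' == '-' || '_' == '*') = false from by decide,
          show ('_' == '+') = false from by decide, show ('_' == '_') = true from by decide,
          show ('_' == '-' || '_' == '*' || '_' == '+') = false from by decide,
          show ('_' == '-' || '_' == '*' || '_' == '_') = true from by decide,
          if_true, if_false, Bool.false_and, Bool.true_and, Bool.false_or, Bool.or_false]
        by_cases hdc : d = '_'
        · subst hdc
          cases hall : rest.all (fun x => x == '_')
          · simp [hall]
          · simp [hall, decide_eq_decide]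
            omega
        · simp [hdc]
      by_cases hdig : PySem.Chars.isdigit c = true
      · have f1 : (c == '#') = false := by simp [h1]
        have f2 : (c == '-' || c == '*') = false := by
          simp; exact ⟨fun h => h2 (Or.inl h), fun h => h2 (Or.inr h)⟩
        have f3 : (c == '+') = false := by simp [h3]
        have f4 : (c == '_') = false := by simp [h4]
        have e1 : (c == '-') = false := by simp; rintro rfl; exact h2 (Or.inl rfl)
        have e2 : (c == '*') = false := by simp; rintro rfl; exact h2 (Or.inr rfl)
        have f5 : (c == '-' || c == '*' || c == '+') = false := by rw [e1, e2, f3]; rfl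
        have f6 : (c == '-' || c == '*' || c == '_') = false := by rw [e1, e2, f4]; rfl
        simp only [pvBRun, pvF, f1, f2, f3, f4, f5, f6, hdig, if_true, if_false,
          Bool.false_and, Bool.true_and, Bool.false_or, Bool.or_false]
        by_cases hdot : d = '.'
        · subst hdot
          cases rest <;> simp [pvBRun]
        · simp [hdot]
      · have hb : PySem.Chars.isdigit c = false := by
          cases hx : PySem.Chars.isdigit c
          · rfl
          · exact absurd hx hdig
        have f1 : (c == '#') = false := by simp [h1]
        have f2 : (c == '-' || c == '*') = false := by
          simp; exact ⟨fun h => h2 (Or.inl h), fun h => h2 (Or.inr h)⟩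
        have f3 : (c == '+') = false := by simp [h3]
        have f4 : (c == '_') = false := by simp [h4]
        have e1 : (c == '-') = false := by simp; rintro rfl; exact h2 (Or.inl rfl)
        have e2 : (c == '*') = false := by simp; rintro rfl; exact h2 (Or.inr rfl)
        have f5 : (c == '-' || c == '*' || c == '+') = false := by rw [e1, e2, f3]; rfl
        have f6 : (c == '-' || c == '*' || c == '_') = false := by rw [e1, e2, f4]; rfl
        simp [pvBRun, pvF, f1, f2, f3, f4, f5, f6, hb]

-- ===== VERDICT (by name: the statement is the Claim_ definition above) =====
theorem is_markdown_structural_py_spec : Claim_equal_is_markdown_structural_py := by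
  intro text _
  unfold Spec_is_markdown_structural_py is_markdown_structural_py is_markdown_structural_py_alt
  rw [pvA_eq_F, pvB_eq_F]
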